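-- pv_equiv track=rewrite | github.com/nihal-ranchod/weather-rag-ibm-hackathon | enhanced_ai_response.py | _identify_current_seasonal_risks
-- ===== SOURCE A (Python) =====
-- def _identify_current_seasonal_risks(current_month: int, location_lower: str) -> str:
--     """Identify current seasonal risks based on month and location"""
--
--     risks = []
--
--     # Hurricane/Typhoon season
--     if current_month in [6, 7, 8, 9, 10, 11]:
--         if any(term in location_lower for term in ['atlantic', 'gulf', 'caribbean', 'florida']):
--             risks.append("Atlantic hurricane season")
--         elif any(term in location_lower for term in ['pacific', 'asia', 'philippines', 'japan']):
--             risks.append("Pacific typhoon season")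
--
--     # Tornado season
--     if current_month in [3, 4, 5, 6]:
--         if any(term in location_lower for term in ['tornado', 'oklahoma', 'kansas', 'plains']):
--             risks.append("peak tornado season")
--
--     # Wildfire season
--     if current_month in [6, 7, 8, 9, 10]:
--         if any(term in location_lower for term in ['california', 'australia', 'mediterranean']):
--             risks.append("wildfire season")
--
--     # Winter storms
--     if current_month in [12, 1, 2, 3]:
--         if any(term in location_lower for term in ['northern', 'canada', 'great lakes']):
--             risks.append("winter storm season")
--
--     # Monsoon season
--     if current_month in [6, 7, 8, 9]:
--         if any(term in location_lower for term in ['india', 'bangladesh', 'myanmar']):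
--             risks.append("monsoon season")
--
--     return ", ".join(risks) if risks else "normal seasonal patterns"
-- ===== SOURCE B (Python) =====
-- # Inverted strategy: instead of checking rules against the location, scan the
-- # location once against a flat term index (term -> (rule id, label)), collecting
-- # every matching (rule, label) pair; then emit, per rule in fixed order and only
-- # when the month is in that rule's season, the FIRST collected label for that
-- # rule.  Atlantic terms precede Pacific terms in the index, which reproduces the
-- # elif priority.
--
-- _TERM_INDEX = [
--     ('atlantic', 0, "Atlantic hurricane season"),
--     ('gulf', 0, "Atlantic hurricane season"),
--     ('caribbean', 0, "Atlantic hurricane season"),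
--     ('florida', 0, "Atlantic hurricane season"),
--     ('pacific', 0, "Pacific typhoon season"),
--     ('asia', 0, "Pacific typhoon season"),
--     ('philippines', 0, "Pacific typhoon season"),
--     ('japan', 0, "Pacific typhoon season"),
--     ('tornado', 1, "peak tornado season"),
--     ('oklahoma', 1, "peak tornado season"),
--     ('kansas', 1, "peak tornado season"),
--     ('plains', 1, "peak tornado season"),
--     ('california', 2, "wildfire season"),
--     ('australia', 2, "wildfire season"),
--     ('mediterranean', 2, "wildfire season"),
--     ('northern', 3, "winter storm season"),
--     ('canada', 3, "winter storm season"),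
--     ('great lakes', 3, "winter storm season"),
--     ('india', 4, "monsoon season"),
--     ('bangladesh', 4, "monsoon season"),
--     ('myanmar', 4, "monsoon season"),
-- ]
--
-- _RULE_MONTHS = [
--     [6, 7, 8, 9, 10, 11],
--     [3, 4, 5, 6],
--     [6, 7, 8, 9, 10],
--     [12, 1, 2, 3],
--     [6, 7, 8, 9],
-- ]
--
--
-- def _identify_current_seasonal_risks(current_month: int, location_lower: str) -> str:
--     matched = [(rule, label) for term, rule, label in _TERM_INDEX
--                if term in location_lower]
--     risks = []
--     for rule, months in enumerate(_RULE_MONTHS):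
--         if current_month in months:
--             label = next((lab for r, lab in matched if r == rule), None)
--             if label is not None:
--                 risks.append(label)
--     return ", ".join(risks) if risks else "normal seasonal patterns"
-- ===== Notes on version B (the rewrite author's own statement) =====
-- stated objective: alternative
-- what changed: Inverted the scan: instead of A's five month-gated blocks each running any() over its own term list, B makes one pass over a flat term->(rule,label) index collecting every (rule,label) pair that matches the location, then a second pass over the rules' month lists emits the first collected label per rule; the elif priority becomes term order in the index.
import Mathlib
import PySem

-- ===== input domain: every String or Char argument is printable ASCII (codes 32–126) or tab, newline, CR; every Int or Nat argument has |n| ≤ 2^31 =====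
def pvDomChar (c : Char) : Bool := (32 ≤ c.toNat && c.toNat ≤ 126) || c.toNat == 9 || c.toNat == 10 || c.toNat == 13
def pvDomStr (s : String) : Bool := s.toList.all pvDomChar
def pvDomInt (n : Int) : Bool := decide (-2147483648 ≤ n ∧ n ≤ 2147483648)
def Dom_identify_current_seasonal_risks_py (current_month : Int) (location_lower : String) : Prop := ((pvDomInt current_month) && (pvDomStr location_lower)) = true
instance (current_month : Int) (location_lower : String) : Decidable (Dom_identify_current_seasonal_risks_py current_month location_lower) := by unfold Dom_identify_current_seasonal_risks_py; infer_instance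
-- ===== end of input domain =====

-- B inverts the scan: one pass over a flat term index collects every matching (rule id, label)
-- pair from the location, then a second pass over the rules' month lists emits the first
-- collected label per rule (objective: alternative decomposition, same cost).

-- ===== PORT A =====
def identify_current_seasonal_risks_py (current_month : Int) (location_lower : String) : String :=
  let risks : List String := []
  -- Hurricane/Typhoon season
  let risks :=
    if ([6, 7, 8, 9, 10, 11] : List Int).contains current_month then
      if (["atlantic", "gulf", "caribbean", "florida"]).any (fun term => PySem.Str.isIn term location_lower) then
        risks ++ ["Atlantic hurricane season"]
      else if (["pacific", "asia", "philippines", "japan"]).any (fun term => PySem.Str.isIn term location_lower) then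
        risks ++ ["Pacific typhoon season"]
      else risks
    else risks
  -- Tornado season
  let risks :=
    if ([3, 4, 5, 6] : List Int).contains current_month then
      if (["tornado", "oklahoma", "kansas", "plains"]).any (fun term => PySem.Str.isIn term location_lower) then
        risks ++ ["peak tornado season"]
      else risks
    else risks
  -- Wildfire season
  let risks :=
    if ([6, 7, 8, 9, 10] : List Int).contains current_month then
      if (["california", "australia", "mediterranean"]).any (fun term => PySem.Str.isIn term location_lower) then
        risks ++ ["wildfire season"]
      else risks
    else risks
  -- Winter storms
  let risks :=
    if ([12, 1, 2, 3] : List Int).contains current_month then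
      if (["northern", "canada", "great lakes"]).any (fun term => PySem.Str.isIn term location_lower) then
        risks ++ ["winter storm season"]
      else risks
    else risks
  -- Monsoon season
  let risks :=
    if ([6, 7, 8, 9] : List Int).contains current_month then
      if (["india", "bangladesh", "myanmar"]).any (fun term => PySem.Str.isIn term location_lower) then
        risks ++ ["monsoon season"]
      else risks
    else risks
  if risks ≠ [] then PySem.Str.join ", " risks else "normal seasonal patterns"

-- ===== PORT B =====
-- flat term index: term -> (rule id, label); Atlantic terms precede Pacific terms (elif priority)
def pvTermIndex : List (String × Int × String) :=
  [("atlantic", 0, "Atlantic hurricane season"),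
   ("gulf", 0, "Atlantic hurricane season"),
   ("caribbean", 0, "Atlantic hurricane season"),
   ("florida", 0, "Atlantic hurricane season"),
   ("pacific", 0, "Pacific typhoon season"),
   ("asia", 0, "Pacific typhoon season"),
   ("philippines", 0, "Pacific typhoon season"),
   ("japan", 0, "Pacific typhoon season"),
   ("tornado", 1, "peak tornado season"),
   ("oklahoma", 1, "peak tornado season"),
   ("kansas", 1, "peak tornado season"),
   ("plains", 1, "peak tornado season"),
   ("california", 2, "wildfire season"),
   ("australia", 2, "wildfire season"),
   ("mediterranean", 2, "wildfire season"),
   ("northern", 3, "winter storm season"),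
   ("canada", 3, "winter storm season"),
   ("great lakes", 3, "winter storm season"),
   ("india", 4, "monsoon season"),
   ("bangladesh", 4, "monsoon season"),
   ("myanmar", 4, "monsoon season")]

def pvRuleMonths : List (List Int) :=
  [[6, 7, 8, 9, 10, 11], [3, 4, 5, 6], [6, 7, 8, 9, 10], [12, 1, 2, 3], [6, 7, 8, 9]]

def identify_current_seasonal_risks_py_alt (current_month : Int) (location_lower : String) : String :=
  -- matched = [(rule, label) for term, rule, label in _TERM_INDEX if term in location_lower]
  let matched : List (Int × String) :=
    (pvTermIndex.filter (fun e => PySem.Str.isIn e.1 location_lower)).map (fun e => (e.2.1, e.2.2))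
  -- for rule, months in enumerate(_RULE_MONTHS): if current_month in months: …
  let risks : List String :=
    (PySem.List.enumerate pvRuleMonths).foldl (fun risks rm =>
      if rm.2.contains current_month then
        -- next((lab for r, lab in matched if r == rule), None)
        match (matched.find? (fun p => p.1 == rm.1)).map Prod.snd with
        | some label => risks ++ [label]
        | none => risks
      else risks) []
  if risks ≠ [] then PySem.Str.join ", " risks else "normal seasonal patterns"

-- ===== PRECONDITION & SPEC =====
def Spec_identify_current_seasonal_risks_py (current_month : Int) (location_lower : String) (out : String) : Prop := out = identify_current_seasonal_risks_py_alt current_month location_lower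
instance (current_month : Int) (location_lower : String) (out : String) : Decidable (Spec_identify_current_seasonal_risks_py current_month location_lower out) := by unfold Spec_identify_current_seasonal_risks_py; infer_instance

-- ===== CLAIM (what is proved, stated in full; the proofs are below) =====
def Claim_equal_identify_current_seasonal_risks_py : Prop := ∀ (current_month : Int) (location_lower : String), Dom_identify_current_seasonal_risks_py current_month location_lower → Spec_identify_current_seasonal_risks_py current_month location_lower (identify_current_seasonal_risks_py current_month location_lower)

-- ===== LEMMAS AND PROOFS =====

-- The first matched (rule, label) pair for each rule id, expressed through A's any-ors.

theorem pvFind0 (loc : String) :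
    (((pvTermIndex.filter (fun e => PySem.Str.isIn e.1 loc)).map (fun e => (e.2.1, e.2.2))).find?
        (fun p => p.1 == (0 : Int))).map Prod.snd =
      (if (["atlantic", "gulf", "caribbean", "florida"]).any (fun term => PySem.Str.isIn term loc) then
        some "Atlantic hurricane season"
      else if (["pacific", "asia", "philippines", "japan"]).any (fun term => PySem.Str.isIn term loc) then
        some "Pacific typhoon season"
      else none) := by
  simp only [pvTermIndex, List.find?_map, List.find?_filter, List.find?, Function.comp]
  simp only [Int.reduceBEq, Bool.false_eq_true, and_true, and_false, decide_false,
    Bool.decide_eq_true, List.any_cons, List.any_nil]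
  rcases Bool.dichotomy (PySem.Str.isIn "atlantic" loc) with h1 | h1 <;>
  rcases Bool.dichotomy (PySem.Str.isIn "gulf" loc) with h2 | h2 <;>
  rcases Bool.dichotomy (PySem.Str.isIn "caribbean" loc) with h3 | h3 <;>
  rcases Bool.dichotomy (PySem.Str.isIn "florida" loc) with h4 | h4 <;>
  rcases Bool.dichotomy (PySem.Str.isIn "pacific" loc) with h5 | h5 <;>
  rcases Bool.dichotomy (PySem.Str.isIn "asia" loc) with h6 | h6 <;>
  rcases Bool.dichotomy (PySem.Str.isIn "philippines" loc) with h7 | h7 <;>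
  rcases Bool.dichotomy (PySem.Str.isIn "japan" loc) with h8 | h8 <;>
    simp only [h1, h2, h3, h4, h5, h6, h7, h8] <;> rfl

theorem pvFind1 (loc : String) :
    (((pvTermIndex.filter (fun e => PySem.Str.isIn e.1 loc)).map (fun e => (e.2.1, e.2.2))).find?
        (fun p => p.1 == (1 : Int))).map Prod.snd =
      (if (["tornado", "oklahoma", "kansas", "plains"]).any (fun term => PySem.Str.isIn term loc) then
        some "peak tornado season" else none) := by
  simp only [pvTermIndex, List.find?_map, List.find?_filter, List.find?, Function.comp]
  simp only [Int.reduceBEq, Bool.false_eq_true, and_true, and_false, decide_false,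
    Bool.decide_eq_true, List.any_cons, List.any_nil]
  rcases Bool.dichotomy (PySem.Str.isIn "tornado" loc) with h1 | h1 <;>
  rcases Bool.dichotomy (PySem.Str.isIn "oklahoma" loc) with h2 | h2 <;>
  rcases Bool.dichotomy (PySem.Str.isIn "kansas" loc) with h3 | h3 <;>
  rcases Bool.dichotomy (PySem.Str.isIn "plains" loc) with h4 | h4 <;>
    simp only [h1, h2, h3, h4] <;> rfl

theorem pvFind2 (loc : String) :
    (((pvTermIndex.filter (fun e => PySem.Str.isIn e.1 loc)).map (fun e => (e.2.1, e.2.2))).find?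
        (fun p => p.1 == (2 : Int))).map Prod.snd =
      (if (["california", "australia", "mediterranean"]).any (fun term => PySem.Str.isIn term loc) then
        some "wildfire season" else none) := by
  simp only [pvTermIndex, List.find?_map, List.find?_filter, List.find?, Function.comp]
  simp only [Int.reduceBEq, Bool.false_eq_true, and_true, and_false, decide_false,
    Bool.decide_eq_true, List.any_cons, List.any_nil]
  rcases Bool.dichotomy (PySem.Str.isIn "california" loc) with h1 | h1 <;>
  rcases Bool.dichotomy (PySem.Str.isIn "australia" loc) with h2 | h2 <;>
  rcases Bool.dichotomy (PySem.Str.isIn "mediterranean" loc) with h3 | h3 <;>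
    simp only [h1, h2, h3] <;> rfl

theorem pvFind3 (loc : String) :
    (((pvTermIndex.filter (fun e => PySem.Str.isIn e.1 loc)).map (fun e => (e.2.1, e.2.2))).find?
        (fun p => p.1 == (3 : Int))).map Prod.snd =
      (if (["northern", "canada", "great lakes"]).any (fun term => PySem.Str.isIn term loc) then
        some "winter storm season" else none) := by
  simp only [pvTermIndex, List.find?_map, List.find?_filter, List.find?, Function.comp]
  simp only [Int.reduceBEq, Bool.false_eq_true, and_true, and_false, decide_false,
    Bool.decide_eq_true, List.any_cons, List.any_nil]
  rcases Bool.dichotomy (PySem.Str.isIn "northern" loc) with h1 | h1 <;>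
  rcases Bool.dichotomy (PySem.Str.isIn "canada" loc) with h2 | h2 <;>
  rcases Bool.dichotomy (PySem.Str.isIn "great lakes" loc) with h3 | h3 <;>
    simp only [h1, h2, h3] <;> rfl

theorem pvFind4 (loc : String) :
    (((pvTermIndex.filter (fun e => PySem.Str.isIn e.1 loc)).map (fun e => (e.2.1, e.2.2))).find?
        (fun p => p.1 == (4 : Int))).map Prod.snd =
      (if (["india", "bangladesh", "myanmar"]).any (fun term => PySem.Str.isIn term loc) then
        some "monsoon season" else none) := by
  simp only [pvTermIndex, List.find?_map, List.find?_filter, List.find?, Function.comp]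
  simp only [Int.reduceBEq, Bool.false_eq_true, and_true, and_false, decide_false,
    Bool.decide_eq_true, List.any_cons, List.any_nil]
  rcases Bool.dichotomy (PySem.Str.isIn "india" loc) with h1 | h1 <;>
  rcases Bool.dichotomy (PySem.Str.isIn "bangladesh" loc) with h2 | h2 <;>
  rcases Bool.dichotomy (PySem.Str.isIn "myanmar" loc) with h3 | h3 <;>
    simp only [h1, h2, h3] <;> rfl

set_option maxHeartbeats 4000000 in
-- ===== VERDICT (by name: the statement is the Claim_ definition above) =====
theorem identify_current_seasonal_risks_py_spec : Claim_equal_identify_current_seasonal_risks_py := by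
  intro current_month location_lower hdom
  unfold Spec_identify_current_seasonal_risks_py
  unfold identify_current_seasonal_risks_py identify_current_seasonal_risks_py_alt
  simp only [pvRuleMonths, PySem.List.enumerate_cons, PySem.List.enumerate_nil, List.foldl,
    Int.reduceAdd, pvFind0, pvFind1, pvFind2, pvFind3, pvFind4]
  generalize ([6, 7, 8, 9, 10, 11] : List Int).contains current_month = m1
  generalize ([3, 4, 5, 6] : List Int).contains current_month = m2
  generalize ([6, 7, 8, 9, 10] : List Int).contains current_month = m3
  generalize ([12, 1, 2, 3] : List Int).contains current_month = m4
  generalize ([6, 7, 8, 9] : List Int).contains current_month = m5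
  generalize (["atlantic", "gulf", "caribbean", "florida"]).any (fun term => PySem.Str.isIn term location_lower) = b1
  generalize (["pacific", "asia", "philippines", "japan"]).any (fun term => PySem.Str.isIn term location_lower) = b2
  generalize (["tornado", "oklahoma", "kansas", "plains"]).any (fun term => PySem.Str.isIn term location_lower) = b3
  generalize (["california", "australia", "mediterranean"]).any (fun term => PySem.Str.isIn term location_lower) = b4
  generalize (["northern", "canada", "great lakes"]).any (fun term => PySem.Str.isIn term location_lower) = b5
  generalize (["india", "bangladesh", "myanmar"]).any (fun term => PySem.Str.isIn term location_lower) = b6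
  clear hdom current_month location_lower
  revert m1 m2 m3 m4 m5 b1 b2 b3 b4 b5 b6
  decide
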